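-- pv_equiv track=rewrite | github.com/snyke7/aoc2023 | utils.py | dijkstra_steps_path
-- ===== SOURCE A (Python) =====
-- from typing import TypeVar, Dict, List, Tuple
--
-- A = TypeVar('A')
--
-- def dijkstra_steps_path(graph: Dict[A, List[A]], start: A) -> Dict[A, Tuple[int, List[A]]]:
--     result = {start: (0, [start])}
--     new = [start]
--     while new:
--         node = new.pop(0)
--         cost, path = result[node]
--         for neigbor in graph[node]:
--             if neigbor not in result or result[neigbor][0] > cost + 1:
--                 result[neigbor] = cost + 1, path + [neigbor]
--                 new.append(neigbor)
--     return result
-- ===== SOURCE B (Python) =====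
-- def dijkstra_steps_path(graph, start):
--     # level-synchronous BFS: process whole frontiers, the distance is the level counter
--     result = {start: (0, [start])}
--     frontier = [start]
--     level = 0
--     while frontier:
--         next_frontier = []
--         for node in frontier:
--             path = result[node][1]
--             for neighbor in graph[node]:
--                 if neighbor not in result:
--                     result[neighbor] = (level + 1, path + [neighbor])
--                     next_frontier.append(neighbor)
--         frontier = next_frontier
--         level += 1
--     return result
-- ===== Notes on version B (the rewrite author's own statement) =====
-- stated objective: alternative
-- what changed: Replaces the FIFO queue with per-node pop(0) and the dist-comparison re-update branch by a level-synchronous BFS that expands whole frontiers, uses the level counter as the distance and inserts a node only on first discovery.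
-- outside the precondition, e.g. on dijkstra_steps_path({'a': [], 'b': ['c']}, 'a'): A returns {'a': (0, ['a'])}, B returns {'a': (0, ['a'])}
import Mathlib
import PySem

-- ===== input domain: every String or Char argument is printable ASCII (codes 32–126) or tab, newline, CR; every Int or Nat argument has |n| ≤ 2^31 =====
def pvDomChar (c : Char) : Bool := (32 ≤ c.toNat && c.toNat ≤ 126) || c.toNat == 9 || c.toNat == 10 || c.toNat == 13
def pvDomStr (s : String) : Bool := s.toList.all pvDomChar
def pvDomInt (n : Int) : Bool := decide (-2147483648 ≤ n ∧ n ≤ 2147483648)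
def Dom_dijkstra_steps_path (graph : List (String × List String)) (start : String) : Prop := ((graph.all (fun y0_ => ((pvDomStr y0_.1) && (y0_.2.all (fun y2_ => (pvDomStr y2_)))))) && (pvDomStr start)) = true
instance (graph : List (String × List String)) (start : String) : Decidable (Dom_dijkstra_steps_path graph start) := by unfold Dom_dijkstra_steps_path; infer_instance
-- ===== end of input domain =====

-- B is a level-synchronous BFS (whole-frontier expansion, the level counter is the distance)
-- instead of A's FIFO queue with per-node pop(0) and a dist-comparison re-update branch.

-- graph[node] : first-match association-list lookup (generated inputs are Python dicts, so keys are unique)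
def pvGGet (graph : List (String × List String)) (k : String) : Option (List String) :=
  match graph with
  | [] => none
  | p :: rest => if p.1 == k then some p.2 else pvGGet rest k

-- fuel bounding the number of loop iterations of either port; proved sufficient below
-- (each iteration beyond the first consumes a node that was inserted into result as a NEW key)
def pvFuel (graph : List (String × List String)) : Nat :=
  (graph.flatMap Prod.snd).length + 2

-- ===== PORT A =====
-- the body of A's 'for neigbor in graph[node]' loop: state = (result, queue)
def pvStepA (cost : Int) (path : List String)
    (st : PySem.Dict String (Int × List String) × List String) (nb : String) :
    PySem.Dict String (Int × List String) × List String :=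
  match st.1.get? nb with
  | none => (st.1.insert nb (cost + 1, path ++ [nb]), st.2 ++ [nb])
  | some (d, _) =>
      if d > cost + 1 then (st.1.insert nb (cost + 1, path ++ [nb]), st.2 ++ [nb]) else st

-- A's 'while new:' loop; 'new.pop(0)' is the head of the queue
def pvLoopA (graph : List (String × List String)) :
    Nat → PySem.Dict String (Int × List String) → List String → PySem.Dict String (Int × List String)
  | 0, res, _ => res
  | _ + 1, res, [] => res
  | fuel + 1, res, node :: rest =>
    match res.get? node with
    | none => res            -- 'cost, path = result[node]': never fails (queued nodes are in result)
    | some (cost, path) =>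
      match pvGGet graph node with
      | none => res          -- Python raises KeyError on graph[node]; excluded by Pre_
      | some nbs =>
        let st := nbs.foldl (pvStepA cost path) (res, rest)
        pvLoopA graph fuel st.1 st.2

def dijkstra_steps_path (graph : List (String × List String)) (start : String) : List (String × Int × List String) :=
  (pvLoopA graph (pvFuel graph) (PySem.Dict.empty.insert start (0, [start])) [start]).items

-- ===== PORT B =====
-- the body of B's 'for neighbor in graph[node]' loop: state = (result, next_frontier)
def pvStepB (level : Int) (path : List String)
    (st : PySem.Dict String (Int × List String) × List String) (nb : String) :
    PySem.Dict String (Int × List String) × List String :=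
  match st.1.get? nb with
  | none => (st.1.insert nb (level + 1, path ++ [nb]), st.2 ++ [nb])
  | some _ => st

-- B's 'for node in frontier' loop body
def pvPassB (graph : List (String × List String)) (level : Int)
    (st : PySem.Dict String (Int × List String) × List String) (node : String) :
    PySem.Dict String (Int × List String) × List String :=
  match st.1.get? node with
  | none => st               -- 'result[node][1]': never fails (frontier nodes are in result)
  | some (_, path) =>
    match pvGGet graph node with
    | none => st             -- Python raises KeyError on graph[node]; excluded by Pre_
    | some nbs => nbs.foldl (pvStepB level path) st

-- B's 'while frontier:' loop
def pvLoopB (graph : List (String × List String)) :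
    Nat → PySem.Dict String (Int × List String) → List String → Int → PySem.Dict String (Int × List String)
  | 0, res, _, _ => res
  | _ + 1, res, [], _ => res
  | fuel + 1, res, node :: fr, level =>
    let st := (node :: fr).foldl (pvPassB graph level) (res, [])
    pvLoopB graph fuel st.1 st.2 (level + 1)

def dijkstra_steps_path_alt (graph : List (String × List String)) (start : String) : List (String × Int × List String) :=
  (pvLoopB graph (pvFuel graph) (PySem.Dict.empty.insert start (0, [start])) [start] 0).items

-- ===== PRECONDITION & SPEC =====
-- Pre_ excludes the inputs on which A raises KeyError (graph[node] for a node that is not a key).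
-- It is conservatively narrower: it also excludes graphs whose only dangling neighbours sit in a
-- part of the graph unreachable from start, where A still returns (see the cite in claim.json);
-- both programs behave identically on those inputs as well.
def Pre_dijkstra_steps_path (graph : List (String × List String)) (start : String) : Prop :=
  start ∈ graph.map Prod.fst ∧
  ∀ p ∈ graph, ∀ nb ∈ p.2, nb ∈ graph.map Prod.fst
instance (graph : List (String × List String)) (start : String) : Decidable (Pre_dijkstra_steps_path graph start) := by unfold Pre_dijkstra_steps_path; infer_instance

def pvWitness_dijkstra_steps_path : (List (String × List String)) × String :=
  ([("a", ["b"]), ("b", [])], "a")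

def Spec_dijkstra_steps_path (graph : List (String × List String)) (start : String) (out : List (String × Int × List String)) : Prop := out = dijkstra_steps_path_alt graph start
instance (graph : List (String × List String)) (start : String) (out : List (String × Int × List String)) : Decidable (Spec_dijkstra_steps_path graph start out) := by unfold Spec_dijkstra_steps_path; infer_instance

-- ===== CLAIM (what is proved, stated in full; the proofs are below) =====
def Claim_equal_dijkstra_steps_path : Prop := ∀ (graph : List (String × List String)) (start : String), Dom_dijkstra_steps_path graph start → Pre_dijkstra_steps_path graph start → Spec_dijkstra_steps_path graph start (dijkstra_steps_path graph start)

-- ===== LEMMAS AND PROOFS =====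

-- every result entry has distance ≤ level+1 and is a key of graph
def pvBound (graph : List (String × List String))
    (res : PySem.Dict String (Int × List String)) (level : Int) : Prop :=
  ∀ k v, res.get? k = some v → v.1 ≤ level + 1 ∧ (pvGGet graph k).isSome = true

-- number of potential keys not yet in result (the termination/fuel measure)
def pvMiss (graph : List (String × List String))
    (res : PySem.Dict String (Int × List String)) : Nat :=
  ((graph.flatMap Prod.snd).toFinset \ res.keys.toFinset).card

theorem pvGGet_mem {graph : List (String × List String)} {k : String} {v : List String}
    (h : pvGGet graph k = some v) : (k, v) ∈ graph := by
  induction graph with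
  | nil => simp [pvGGet] at h
  | cons p rest ih =>
    rw [pvGGet] at h
    split at h
    · rename_i hb
      obtain rfl : p.2 = v := by injection h
      obtain rfl : p.1 = k := by exact eq_of_beq hb
      exact List.mem_cons_self
    · exact List.mem_cons_of_mem _ (ih h)

theorem pvGGet_isSome {graph : List (String × List String)} {k : String} :
    k ∈ graph.map Prod.fst → (pvGGet graph k).isSome = true := by
  induction graph with
  | nil => intro h; simp at h
  | cons p rest ih =>
    intro h
    rw [pvGGet]
    split
    · rfl
    · rename_i hb
      rcases List.mem_map.1 h with ⟨q, hq, hk⟩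
      rcases List.mem_cons.1 hq with rfl | hq
      · simp [hk] at hb
      · exact ih (List.mem_map.2 ⟨q, hq, hk⟩)

theorem pvInner
    (graph : List (String × List String)) (level : Int) (path : List String)
    (nbs : List String) :
    ∀ res : PySem.Dict String (Int × List String),
    pvBound graph res level →
    (∀ nb ∈ nbs, (pvGGet graph nb).isSome = true) →
    (∀ nb ∈ nbs, nb ∈ graph.flatMap Prod.snd) →
    ∃ r' t,
      (∀ q, nbs.foldl (pvStepB level path) (res, q) = (r', q ++ t)) ∧
      (∀ q, nbs.foldl (pvStepA level path) (res, q) = (r', q ++ t)) ∧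
      pvBound graph r' level ∧
      (∀ k v, res.get? k = some v → r'.get? k = some v) ∧
      (∀ n ∈ t, ∃ p, r'.get? n = some (level + 1, p)) ∧
      pvMiss graph r' + t.length ≤ pvMiss graph res := by
  induction nbs with
  | nil =>
    intro res hB _ _
    exact ⟨res, [], by simp, by simp, hB, fun _ _ h => h, by simp, le_refl _⟩
  | cons nb nbs ih =>
    intro res hB hSome hFlat
    rcases hG : res.get? nb with _ | v
    · -- nb not yet in result: both ports insert it and append it
      have hnbS : (pvGGet graph nb).isSome = true := hSome nb List.mem_cons_self
      have hnbF : nb ∈ graph.flatMap Prod.snd := hFlat nb List.mem_cons_self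
      set res1 := res.insert nb (level + 1, path ++ [nb]) with hres1
      have hB1 : pvBound graph res1 level := by
        intro k v hk
        rw [hres1, PySem.Dict.get?_insert] at hk
        split at hk
        · rename_i hke; subst hke; cases hk; exact ⟨le_refl _, hnbS⟩
        · exact hB k v hk
      obtain ⟨r', t', hQB, hQA, hB', hPres, hT, hM⟩ :=
        ih res1 hB1 (fun x hx => hSome x (List.mem_cons_of_mem _ hx))
          (fun x hx => hFlat x (List.mem_cons_of_mem _ hx))
      have hPres1 : ∀ k v, res.get? k = some v → res1.get? k = some v := by
        intro k v hk
        rw [hres1, PySem.Dict.get?_insert]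
        split
        · rename_i hke; rw [hke, hG] at hk; cases hk
        · exact hk
      refine ⟨r', nb :: t', ?_, ?_, hB', fun k v hk => hPres k v (hPres1 k v hk), ?_, ?_⟩
      · intro q
        rw [List.foldl_cons]
        show nbs.foldl (pvStepB level path) (pvStepB level path (res, q) nb) = _
        rw [pvStepB]; simp only [hG]
        rw [hQB (q ++ [nb])]
        simp
      · intro q
        rw [List.foldl_cons]
        show nbs.foldl (pvStepA level path) (pvStepA level path (res, q) nb) = _
        rw [pvStepA]; simp only [hG]
        rw [hQA (q ++ [nb])]
        simp
      · intro n hn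
        rcases List.mem_cons.1 hn with rfl | hn
        · exact ⟨path ++ [n], hPres n _ (by rw [hres1]; exact PySem.Dict.get?_insert_self _ _ _)⟩
        · exact hT n hn
      · -- the miss measure drops by one at the fresh key nb
        have hnk : nb ∉ res.keys := (PySem.Dict.get?_eq_none_iff_not_mem_keys _ _).1 hG
        have hcont : res.contains nb = false := by
          rw [PySem.Dict.contains_eq_isSome_get?, hG]; rfl
        have hkeys : res1.keys = res.keys ++ [nb] := by
          rw [hres1]; exact PySem.Dict.keys_insert_of_not_contains _ _ hcont
        have hmem : nb ∈ (graph.flatMap Prod.snd).toFinset \ res.keys.toFinset := by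
          rw [Finset.mem_sdiff, List.mem_toFinset, List.mem_toFinset]
          exact ⟨hnbF, hnk⟩
        have hmiss1 : pvMiss graph res1 + 1 ≤ pvMiss graph res := by
          unfold pvMiss
          rw [hkeys]
          have : (res.keys ++ [nb]).toFinset = insert nb res.keys.toFinset := by
            simp [List.toFinset_append, Finset.union_comm]
          rw [this, Finset.sdiff_insert, Finset.card_erase_of_mem hmem]
          have hpos : 0 < ((graph.flatMap Prod.snd).toFinset \ res.keys.toFinset).card :=
            Finset.card_pos.2 ⟨nb, hmem⟩
          omega
        have := hM
        simp only [List.length_cons]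
        unfold pvMiss at *
        omega
    · -- nb already in result: A's re-update test 'd > cost+1' is false (pvBound), both skip
      obtain ⟨d, p0⟩ := v
      have hd : d ≤ level + 1 := (hB nb (d, p0) hG).1
      obtain ⟨r', t', hQB, hQA, hB', hPres, hT, hM⟩ :=
        ih res hB (fun x hx => hSome x (List.mem_cons_of_mem _ hx))
          (fun x hx => hFlat x (List.mem_cons_of_mem _ hx))
      refine ⟨r', t', ?_, ?_, hB', hPres, hT, hM⟩
      · intro q
        rw [List.foldl_cons]
        show nbs.foldl (pvStepB level path) (pvStepB level path (res, q) nb) = _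
        rw [pvStepB]; simp only [hG]
        exact hQB q
      · intro q
        rw [List.foldl_cons]
        show nbs.foldl (pvStepA level path) (pvStepA level path (res, q) nb) = _
        rw [pvStepA]; simp only [hG]
        rw [if_neg (by omega)]
        exact hQA q

theorem pvPass
    (graph : List (String × List String)) (level : Int)
    (hPre : ∀ p ∈ graph, ∀ nb ∈ p.2, (pvGGet graph nb).isSome = true)
    (frontier : List String) :
    ∀ (res : PySem.Dict String (Int × List String)) (nxt : List String) (f : Nat),
    pvBound graph res level →
    (∀ n ∈ frontier, ∃ p, res.get? n = some (level, p)) →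
    ∃ r' t,
      frontier.foldl (pvPassB graph level) (res, nxt) = (r', nxt ++ t) ∧
      pvLoopA graph (f + frontier.length) res (frontier ++ nxt) = pvLoopA graph f r' (nxt ++ t) ∧
      pvBound graph r' level ∧
      (∀ k v, res.get? k = some v → r'.get? k = some v) ∧
      (∀ n ∈ t, ∃ p, r'.get? n = some (level + 1, p)) ∧
      pvMiss graph r' + t.length ≤ pvMiss graph res := by
  induction frontier with
  | nil =>
    intro res nxt f hB _
    exact ⟨res, [], by simp, by simp, hB, fun _ _ h => h, by simp, le_refl _⟩
  | cons node fr ih =>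
    intro res nxt f hB hF
    obtain ⟨path, hnode⟩ := hF node List.mem_cons_self
    have hGS : (pvGGet graph node).isSome = true := (hB node _ hnode).2
    obtain ⟨nbs, hnbs⟩ := Option.isSome_iff_exists.1 hGS
    have hmemg : (node, nbs) ∈ graph := pvGGet_mem hnbs
    obtain ⟨r1, t1, hQB, hQA, hB1, hPres1, hT1, hM1⟩ :=
      pvInner graph level path nbs res hB
        (fun nb h => hPre _ hmemg nb h)
        (fun nb h => List.mem_flatMap.2 ⟨(node, nbs), hmemg, h⟩)
    obtain ⟨r2, t2, hFold2, hLoop2, hB2, hPres2, hT2, hM2⟩ :=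
      ih r1 (nxt ++ t1) f hB1
        (fun n hn => by
          obtain ⟨p, hp⟩ := hF n (List.mem_cons_of_mem _ hn)
          exact ⟨p, hPres1 n _ hp⟩)
    refine ⟨r2, t1 ++ t2, ?_, ?_, hB2, fun k v h => hPres2 k v (hPres1 k v h), ?_, ?_⟩
    · rw [List.foldl_cons]
      show fr.foldl (pvPassB graph level) (pvPassB graph level (res, nxt) node) = _
      rw [pvPassB]; simp only [hnode, hnbs]
      rw [hQB nxt, hFold2, List.append_assoc]
    · have hlen : f + (node :: fr).length = (f + fr.length) + 1 := by simp; omega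
      rw [hlen]
      show pvLoopA graph ((f + fr.length) + 1) res (node :: (fr ++ nxt)) = _
      rw [pvLoopA]; simp only [hnode, hnbs]
      rw [hQA (fr ++ nxt)]
      have : (fr ++ nxt) ++ t1 = fr ++ (nxt ++ t1) := by rw [List.append_assoc]
      rw [this, hLoop2, List.append_assoc]
    · intro n hn
      rcases List.mem_append.1 hn with hn | hn
      · obtain ⟨p, hp⟩ := hT1 n hn
        exact ⟨p, hPres2 n _ hp⟩
      · exact hT2 n hn
    · rw [List.length_append]; omega

theorem pvLoopA_nil (graph : List (String × List String))
    (res : PySem.Dict String (Int × List String)) :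
    ∀ f, pvLoopA graph f res [] = res := by
  intro f; cases f <;> rfl

theorem pvLoopB_nil (graph : List (String × List String))
    (res : PySem.Dict String (Int × List String)) (level : Int) :
    ∀ f, pvLoopB graph f res [] level = res := by
  intro f; cases f <;> rfl

theorem pvLoops
    (graph : List (String × List String))
    (hPre : ∀ p ∈ graph, ∀ nb ∈ p.2, (pvGGet graph nb).isSome = true) :
    ∀ (fB fA : Nat) (res : PySem.Dict String (Int × List String)) (frontier : List String) (level : Int),
    pvBound graph res level →
    (∀ n ∈ frontier, ∃ p, res.get? n = some (level, p)) →
    fA ≥ frontier.length + pvMiss graph res + 1 →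
    fB ≥ pvMiss graph res + 1 →
    pvLoopA graph fA res frontier = pvLoopB graph fB res frontier level := by
  intro fB
  induction fB with
  | zero => intro fA res frontier level _ _ _ hfB; omega
  | succ fB ih =>
    intro fA res frontier level hB hF hfA hfB
    match frontier with
    | [] =>
      rw [pvLoopB, pvLoopA_nil]
    | node :: fr =>
      obtain ⟨r', t, hFold, hLoop, hB', hPres, hT, hM⟩ :=
        pvPass graph level hPre (node :: fr) res [] (fA - (node :: fr).length) hB hF
      simp only [List.nil_append, List.append_nil] at hFold hLoop
      have hlen : (fA - (node :: fr).length) + (node :: fr).length = fA := by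
        simp only [List.length_cons] at hfA ⊢; omega
      rw [hlen] at hLoop
      have hBeq : pvLoopB graph (fB + 1) res (node :: fr) level = pvLoopB graph fB r' t (level + 1) := by
        rw [pvLoopB]
        simp only [hFold]
      rw [hLoop, hBeq]
      match t, hT, hM with
      | [], _, _ => rw [pvLoopA_nil, pvLoopB_nil]
      | n0 :: t', hT, hM =>
        apply ih
        · intro k v hk
          obtain ⟨h1, h2⟩ := hB' k v hk
          exact ⟨by omega, h2⟩
        · exact hT
        · simp only [List.length_cons] at hfA hM ⊢; omega
        · simp only [List.length_cons] at hM; omega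

-- ===== VERDICT (by name: the statement is the Claim_ definition above) =====
theorem dijkstra_steps_path_spec : Claim_equal_dijkstra_steps_path := by
  intro graph start _ hPre
  obtain ⟨hStart0, hPre20⟩ := hPre
  have hStart : (pvGGet graph start).isSome = true := pvGGet_isSome hStart0
  have hPre2 : ∀ p ∈ graph, ∀ nb ∈ p.2, (pvGGet graph nb).isSome = true :=
    fun p hp nb hnb => pvGGet_isSome (hPre20 p hp nb hnb)
  unfold Spec_dijkstra_steps_path dijkstra_steps_path dijkstra_steps_path_alt
  congr 1
  have hcard : pvMiss graph (PySem.Dict.empty.insert start ((0 : Int), [start])) ≤ (graph.flatMap Prod.snd).length := by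
    unfold pvMiss
    calc ((graph.flatMap Prod.snd).toFinset \ (PySem.Dict.empty.insert start ((0 : Int), [start])).keys.toFinset).card
        ≤ (graph.flatMap Prod.snd).toFinset.card := Finset.card_le_card Finset.sdiff_subset
      _ ≤ (graph.flatMap Prod.snd).length := List.toFinset_card_le _
  apply pvLoops graph hPre2
  · intro k v hk
    rw [PySem.Dict.get?_insert] at hk
    split at hk
    · rename_i hke; subst hke; cases hk; exact ⟨by norm_num, hStart⟩
    · rw [PySem.Dict.get?_empty] at hk; cases hk
  · intro n hn
    have he := List.mem_singleton.1 hn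
    subst he
    exact ⟨[n], PySem.Dict.get?_insert_self _ _ _⟩
  · simp only [pvFuel, List.length_cons, List.length_nil]; omega
  · simp only [pvFuel]; omega
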